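-- pv_equiv track=rewrite | github.com/ItsMeOX/Application1 | leetcode/completed/2150.py | findLonely
-- ===== SOURCE A (Python) =====
-- from typing import List
--
-- def findLonely(nums: List[int]) -> List[int]:
--     counter = {}
--
--     for num in nums:
--         counter[num] = counter.get(num, 0) + 1
--
--     res = []
--
--     for key in counter:
--         if counter[key] == 1 and key + 1 not in counter and key - 1 not in counter:
--             res.append(key)
--
--     return res
-- ===== SOURCE B (Python) =====
-- from typing import List
--
-- def findLonely(nums: List[int]) -> List[int]:
--     # sort-and-scan: in sorted order a value is lonely exactly when both its
--     # neighbours are more than 1 away; then keep nums' original order.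
--     s = sorted(nums)
--     lonely = {x for p, x, n in zip([None] + s, s, s[1:] + [None])
--               if (p is None or p + 1 < x) and (n is None or x + 1 < n)}
--     return [v for v in nums if v in lonely]
-- ===== Notes on version B (the rewrite author's own statement) =====
-- stated objective: alternative
-- what changed: Replaces A's hash-counter plus per-key neighbour lookups by sorting a copy and scanning adjacent neighbour triples (a value is lonely iff both sorted neighbours are more than 1 away), then filtering nums by the lonely set to keep A's first-appearance order.
import Mathlib
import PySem

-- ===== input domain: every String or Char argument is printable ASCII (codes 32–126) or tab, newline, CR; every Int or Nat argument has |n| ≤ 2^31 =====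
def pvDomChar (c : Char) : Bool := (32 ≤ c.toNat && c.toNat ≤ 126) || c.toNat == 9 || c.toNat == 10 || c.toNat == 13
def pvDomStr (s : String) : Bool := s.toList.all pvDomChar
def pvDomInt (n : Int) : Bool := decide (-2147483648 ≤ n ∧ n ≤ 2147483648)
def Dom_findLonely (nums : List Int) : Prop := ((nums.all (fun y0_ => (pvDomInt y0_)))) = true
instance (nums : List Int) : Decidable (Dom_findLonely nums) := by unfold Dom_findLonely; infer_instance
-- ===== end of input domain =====

-- B replaces A's hash-counter + neighbour lookups by sort-then-adjacent-gap scan,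
-- then filters nums by the lonely set (alternative algorithm; O(n log n) in Python).


-- ===== PORT A =====
def findLonely (nums : List Int) : List Int :=
  let counter := nums.foldl (fun d num => d.insert num (d.getD num 0 + 1)) (PySem.Dict.empty : PySem.Dict Int Int)
  -- counter[key] ported as getD key 0: exact, since key is drawn from counter.keys
  counter.keys.foldl
    (fun res key =>
      if counter.getD key 0 == 1 && !(counter.contains (key + 1)) && !(counter.contains (key - 1))
      then res ++ [key] else res) []

-- ===== PORT B =====
def findLonely_alt (nums : List Int) : List Int :=
  let s := PySem.List.sorted nums (fun x => x) false
  -- zip([None]+s, s, s[1:]+[None]) as nested pairs ((p, x), n); s[1:] via PySem.List.slice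
  let triples := ((none :: s.map some).zip s).zip
      ((PySem.List.slice s (some 1) none).map some ++ [none])
  -- the set comprehension: filter the triples by the two gap tests, collect the x's
  let lonely : PySem.Set Int := PySem.Set.ofList
    ((triples.filter (fun t =>
        (t.1.1.all (fun p => decide (p + 1 < t.1.2))) &&
        (t.2.all (fun n => decide (t.1.2 + 1 < n))))).map (fun t => t.1.2))
  nums.filter (fun v => lonely.contains v)

-- ===== PRECONDITION & SPEC =====
def Spec_findLonely (nums : List Int) (out : List Int) : Prop := out = findLonely_alt nums
instance (nums : List Int) (out : List Int) : Decidable (Spec_findLonely nums out) := by unfold Spec_findLonely; infer_instance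

-- ===== CLAIM (what is proved, stated in full; the proofs are below) =====
def Claim_equal_findLonely : Prop := ∀ (nums : List Int), Dom_findLonely nums → Spec_findLonely nums (findLonely nums)

-- ===== LEMMAS AND PROOFS =====

-- Filtering the first-occurrence dedup of l equals filtering l itself, provided every
-- element the predicate accepts occurs at most once in l (accumulator-generalised form).
theorem foldl_add_filter (p : Int → Bool) (l : List Int) (s : List Int)
    (h1 : ∀ x, p x = true → l.count x ≤ 1)
    (h2 : ∀ x, p x = true → x ∈ s → x ∉ l) :
    (l.foldl PySem.Set.add s).filter p = s.filter p ++ l.filter p := by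
  induction l generalizing s with
  | nil => simp
  | cons a l ih =>
    simp only [List.foldl_cons]
    by_cases hmem : a ∈ s
    · have hadd : PySem.Set.add s a = s := by
        simp [PySem.Set.add, PySem.Set.contains, hmem]
      have hpa : p a = false := by
        by_contra h
        have : p a = true := by revert h; cases p a <;> simp
        exact h2 a this hmem (List.mem_cons_self)
      rw [hadd, ih s
        (fun x hx => le_trans (List.count_le_count_cons (l := l) (a := x) (b := a)) (h1 x hx))
        (fun x hx hxs hxl => h2 x hx hxs (List.mem_cons_of_mem _ hxl))]
      simp [hpa]
    · have hadd : PySem.Set.add s a = s ++ [a] := by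
        simp [PySem.Set.add, PySem.Set.contains, hmem]
      have hanl : p a = true → a ∉ l := by
        intro hpa
        have := h1 a hpa
        simp [List.count_cons_self] at this
        exact (List.count_eq_zero).1 this
      rw [hadd, ih (s ++ [a])
        (fun x hx => le_trans (List.count_le_count_cons (l := l) (a := x) (b := a)) (h1 x hx))
        ?_]
      · cases hpa : p a <;> simp [List.filter_append, hpa]
      · intro x hx hxs hxl
        rcases List.mem_append.1 hxs with h | h
        · exact h2 x hx h (List.mem_cons_of_mem _ hxl)
        · simp at h; subst h; exact hanl hx hxl

-- A reduces to a single filter of nums by the "count 1, no value ±1" test.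
theorem findLonely_eq_filter (nums : List Int) :
    findLonely nums = nums.filter (fun x =>
      ((nums.count x : Int) == 1) && !(nums.contains (x + 1)) && !(nums.contains (x - 1))) := by
  unfold findLonely
  simp only [PySem.Dict.foldl_insert_getD_add_one_eq_counter]
  refine Eq.trans (PySem.List.foldl_append_if_eq_filter
        (fun key => (PySem.Dict.counter nums).getD key 0 == 1 &&
          !(PySem.Dict.counter nums).contains (key + 1) &&
          !(PySem.Dict.counter nums).contains (key - 1)) (PySem.Dict.counter nums).keys []) ?_
  rw [PySem.Dict.keys_counter]
  simp only [PySem.Dict.getD_counter, PySem.Dict.contains_counter, List.nil_append]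
  have hofList : PySem.Set.ofList nums = nums.foldl PySem.Set.add [] :=
    PySem.Set.ofList_eq_foldl nums
  set p : Int → Bool := fun x =>
    ((nums.count x : Int) == 1) && !(nums.contains (x + 1)) && !(nums.contains (x - 1)) with hp
  have hcount : ∀ x, p x = true → nums.count x ≤ 1 := by
    intro x hx
    simp only [hp, Bool.and_eq_true, beq_iff_eq] at hx
    omega
  rw [hofList, foldl_add_filter p nums [] hcount (by simp)]
  simp

-- proof helper: the filtered zip, read as a recursion over the sorted list with the
-- previous element in hand
def scanLonely (prev : Option Int) : List Int → List Int
  | [] => []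
  | x :: rest =>
    (if (prev.all (fun p => decide (p + 1 < x))) && (rest.head?.all (fun y => decide (x + 1 < y)))
     then [x] else []) ++ scanLonely (some x) rest

-- B's comprehension over the neighbour triples IS scanLonely (prev generalises [None]+s's head).
theorem triples_filter_eq_scanLonely (s : List Int) (prev : Option Int) :
    ((((prev :: s.map some).zip s).zip ((s.drop 1).map some ++ [none])).filter (fun t =>
        (t.1.1.all (fun p => decide (p + 1 < t.1.2))) &&
        (t.2.all (fun n => decide (t.1.2 + 1 < n))))).map (fun t => t.1.2)
      = scanLonely prev s := by
  induction s generalizing prev with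
  | nil => simp [scanLonely]
  | cons x rest ih =>
    cases rest with
    | nil =>
      simp only [scanLonely, List.map_cons, List.zip_cons_cons, List.drop_succ_cons,
        List.drop_nil, List.map_nil, List.nil_append, List.zip_nil_right,
        List.filter_cons, List.head?_nil]
      split <;> simp_all
    | cons y t =>
      have ihx := ih (some x)
      simp only [List.map_cons, List.zip_cons_cons, List.drop_succ_cons, List.drop_zero] at ihx
      cases hp : prev.all (fun p => decide (p + 1 < x)) <;>
        cases hxy : decide (x + 1 < y) <;>
          simp [scanLonely, hp, hxy, ihx]

-- Membership in the scan of a sorted list characterised by counts and neighbours.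
theorem mem_scanLonely (s : List Int) (prev : Option Int)
    (hs : s.Pairwise (· ≤ ·))
    (hp : ∀ p, prev = some p → ∀ y ∈ s, p ≤ y) (v : Int) :
    v ∈ scanLonely prev s ↔
      v ∈ s ∧ s.count v = 1 ∧ (v + 1) ∉ s ∧ (v - 1) ∉ s ∧
      (∀ p, prev = some p → p + 1 < v) := by
  induction s generalizing prev with
  | nil => simp [scanLonely]
  | cons x rest ih =>
    have hxr : ∀ y ∈ rest, x ≤ y := (List.pairwise_cons.1 hs).1
    have hrest : rest.Pairwise (· ≤ ·) := (List.pairwise_cons.1 hs).2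
    have hokN : (rest.head?.all (fun y => decide (x + 1 < y)) = true) ↔
        (x ∉ rest ∧ (x + 1) ∉ rest) := by
      cases rest with
      | nil => simp
      | cons y t =>
        have hyt : ∀ z ∈ t, y ≤ z := (List.pairwise_cons.1 hrest).1
        simp only [List.head?_cons, Option.all_some, decide_eq_true_eq]
        constructor
        · intro h
          constructor <;> intro hm <;> rcases List.mem_cons.1 hm with h' | h'
          · omega
          · have := hyt _ h'; omega
          · omega
          · have := hyt _ h'; omega
        · rintro ⟨h1, h2⟩
          have hxy : x ≤ y := hxr y List.mem_cons_self
          have : y ≠ x := fun he => h1 (he ▸ List.mem_cons_self)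
          have : y ≠ x + 1 := fun he => h2 (he ▸ List.mem_cons_self)
          omega
    have ihx := ih (some x) hrest (by intro p hp0; simp at hp0; subst hp0; exact hxr)
    simp only [scanLonely, List.mem_append, List.mem_ite_nil_right, List.mem_singleton,
      Bool.and_eq_true, ihx]
    constructor
    · rintro (⟨⟨hokP, hN⟩, hveq⟩ | ⟨hm, hc, h1, h2, hpr⟩)
      · have ⟨hnx, hnx1⟩ := hokN.1 hN
        subst hveq
        refine ⟨List.mem_cons_self, ?_, ?_, ?_, ?_⟩
        · simp [List.count_eq_zero.2 hnx]
        · intro hm; rcases List.mem_cons.1 hm with h | h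
          · omega
          · exact hnx1 h
        · intro hm; rcases List.mem_cons.1 hm with h | h
          · omega
          · have := hxr _ h; omega
        · intro p hpeq
          cases prev with
          | none => simp at hpeq
          | some q =>
            simp at hpeq; subst hpeq
            simpa using hokP
      · have hxv : x + 1 < v := hpr x rfl
        refine ⟨List.mem_cons_of_mem _ hm, ?_, ?_, ?_, ?_⟩
        · rw [List.count_cons]; simp [hc]; omega
        · intro h; rcases List.mem_cons.1 h with h' | h'
          · omega
          · exact h1 h'
        · intro h; rcases List.mem_cons.1 h with h' | h'
          · omega
          · exact h2 h'
        · intro p hpeq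
          have := hp p hpeq x List.mem_cons_self
          omega
    · rintro ⟨hm, hc, h1, h2, hpr⟩
      by_cases hvx : v = x
      · subst hvx
        left
        refine ⟨⟨?_, ?_⟩, rfl⟩
        · cases prev with
          | none => simp
          | some q => simpa using hpr q rfl
        · refine hokN.2 ⟨?_, fun h => h1 (List.mem_cons_of_mem _ h)⟩
          intro h
          rw [List.count_cons] at hc
          simp at hc
          have := List.one_le_count_iff.2 h
          omega
      · right
        have hmr : v ∈ rest := by
          rcases List.mem_cons.1 hm with h | h
          · exact absurd h hvx
          · exact h
        have hxv : x ≤ v := hxr _ hmr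
        have hvx1 : v ≠ x + 1 := fun he => h2 (by rw [he]; simpa using List.mem_cons_self)
        refine ⟨hmr, ?_, fun h => h1 (List.mem_cons_of_mem _ h),
          fun h => h2 (List.mem_cons_of_mem _ h), ?_⟩
        · rw [List.count_cons] at hc
          have hne : ¬ (x = v) := fun h => hvx h.symm
          simp [hne] at hc; exact hc
        · rintro p hpeq; simp at hpeq; subst hpeq; omega

-- ===== VERDICT (by name: the statement is the Claim_ definition above) =====
theorem findLonely_spec : Claim_equal_findLonely := by
  intro nums _
  show findLonely nums = findLonely_alt nums
  rw [findLonely_eq_filter]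
  unfold findLonely_alt
  set s := PySem.List.sorted nums (fun x => x) false with hsdef
  have hsl : PySem.List.slice s (some 1) none = s.drop 1 := by
    simpa using PySem.List.slice_from_natCast s 1
  simp only [hsl, triples_filter_eq_scanLonely s none]
  have hperm : s.Perm nums := PySem.List.sorted_perm nums (fun x => x) false
  have hsorted : s.Pairwise (· ≤ ·) := by
    simpa using PySem.List.sorted_pairwise nums (fun x => x)
  have hchar := mem_scanLonely s none hsorted (by simp)
  apply List.filter_congr
  intro v hv
  rw [Bool.eq_iff_iff]
  simp only [Bool.and_eq_true, beq_iff_eq, Bool.not_eq_true', List.contains_eq_mem,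
    decide_eq_false_iff_not, decide_eq_true_eq, PySem.Set.contains_eq_listContains,
    PySem.Set.mem_ofList]
  rw [hchar v]
  rw [hperm.count_eq, hperm.mem_iff, hperm.mem_iff, hperm.mem_iff]
  constructor
  · rintro ⟨⟨h1, h2⟩, h3⟩
    exact ⟨hv, by omega, h2, h3, by simp⟩
  · rintro ⟨_, hc, h2, h3, _⟩
    exact ⟨⟨by omega, h2⟩, h3⟩
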